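-- pv_equiv track=rewrite | github.com/heejin42/study_algorithm | programmers/행렬과연산.py | solution
-- ===== SOURCE A (Python) =====
-- from collections import deque
--
-- def solution(rc, operations):
--     height = len(rc)
--     width = len(rc[0])
--     left_col = deque([rc[i][0] for i in range(height)])
--     right_col = deque([rc[i][width - 1] for i in range(height)])
--     rows = deque([deque(rc[i][1:width - 1]) for i in range(height)])
--
--     for op in operations:
--         if op == 'ShiftRow':
--             left_col.appendleft(left_col.pop())
--             rows.appendleft(rows.pop())
--             right_col.appendleft(right_col.pop())
--         else:  # 'Rotate'
--             rows[0].appendleft(left_col.popleft())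
--             right_col.appendleft(rows[0].pop())
--             rows[height - 1].append(right_col.pop())
--             left_col.append(rows[height - 1].popleft())
--     answer = []
--     for i in range(height):
--         answer.append([left_col[i]] + list(rows[i]) + [right_col[i]])
--     return answer
-- ===== SOURCE B (Python) =====
-- def solution(rc, operations):
--     g = [list(row) for row in rc]
--     h = len(g)
--     w = len(g[0])
--     for op in operations:
--         if op == 'ShiftRow':
--             g = [g[-1]] + g[:-1]
--         else:  # 'Rotate': shift the border ring one step clockwise
--             new = []
--             for i in range(h):
--                 row = g[i]
--                 if i == 0:
--                     new.append([g[1][0]] + row[:w - 1])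
--                 elif i == h - 1:
--                     new.append(row[1:] + [g[h - 2][w - 1]])
--                 else:
--                     new.append([g[i + 1][0]] + row[1:w - 1] + [g[i - 1][w - 1]])
--             g = new
--     return g
-- ===== Notes on version B (the rewrite author's own statement) =====
-- stated objective: simpler
-- what changed: B works on the plain list-of-lists grid (cyclic row shift / one clockwise rotation of the border ring per op) instead of A's three-deque decomposition into left column, middle rows and right column.
-- outside the precondition, e.g. on solution([[1, 2], [3, 4, 5]], []): A returns [[1, 2], [3, 4]], B returns [[1, 2], [3, 4, 5]]; on solution([[1], [2]], ['Rotate']): A returns [[2, 1], [2, 1]], B returns [[2], [1]]; on solution([[1, 2, 3]], ['Rotate']): A returns [[1, 3, 2]], B raises IndexError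
import Mathlib
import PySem

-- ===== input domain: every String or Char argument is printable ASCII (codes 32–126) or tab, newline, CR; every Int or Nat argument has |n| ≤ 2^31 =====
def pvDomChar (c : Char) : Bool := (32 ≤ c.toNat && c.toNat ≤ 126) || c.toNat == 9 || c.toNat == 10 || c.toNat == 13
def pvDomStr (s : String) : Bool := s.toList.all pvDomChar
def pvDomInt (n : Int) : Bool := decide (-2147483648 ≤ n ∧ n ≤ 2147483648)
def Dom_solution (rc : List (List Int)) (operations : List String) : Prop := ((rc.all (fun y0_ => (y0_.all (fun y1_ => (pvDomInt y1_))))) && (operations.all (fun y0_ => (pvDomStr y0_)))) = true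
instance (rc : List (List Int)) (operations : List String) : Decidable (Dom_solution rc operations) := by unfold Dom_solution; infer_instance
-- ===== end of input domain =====

-- B replaces A's three-deque decomposition (left column / middle rows / right column) by direct
-- operations on the plain grid: a cyclic downward row shift, and a clockwise rotation of the
-- border ring computed row by row; objective: simpler. A mutates only its local deques, not rc.


-- ===== PORT A =====
-- A's loop body on its state (left_col, rows, right_col); Python deque pop/popleft raise on an
-- empty deque — Pre_ (h ≥ 2, w ≥ 2, rectangular) keeps every deque nonempty, so the D-defaults
-- below are never taken on admitted inputs; elsewhere the ports are step-for-step exact.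
def stepA (height : Nat) (st : List Int × List (List Int) × List Int) (op : String) :
    List Int × List (List Int) × List Int :=
  let L := st.1
  let M := st.2.1
  let R := st.2.2
  if op = "ShiftRow" then
    (L.getLastD 0 :: L.dropLast, M.getLastD [] :: M.dropLast, R.getLastD 0 :: R.dropLast)
  else
    -- rows[0].appendleft(left_col.popleft())
    let l0 := L.headD 0
    let L1 := L.drop 1
    let row0 := l0 :: M.headD []
    -- right_col.appendleft(rows[0].pop())
    let t := row0.getLastD 0
    let M1 := M.set 0 row0.dropLast
    let R1 := t :: R
    -- rows[height-1].append(right_col.pop())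
    let rlast := R1.getLastD 0
    let R2 := R1.dropLast
    let rowL := M1.getD (height - 1) [] ++ [rlast]
    -- left_col.append(rows[height-1].popleft())
    let M2 := M1.set (height - 1) (rowL.drop 1)
    (L1 ++ [rowL.headD 0], M2, R2)

def solution (rc : List (List Int)) (operations : List String) : List (List Int) :=
  let height := rc.length
  let width := (rc.headD []).length
  -- rc[i][0], rc[i][width-1], rc[i][1:width-1] — exact for the rectangular w ≥ 2 inputs of Pre_
  let L0 := rc.map (fun r => r.headD 0)
  let R0 := rc.map (fun r => r.getD (width - 1) 0)
  let M0 := rc.map (fun r => (r.drop 1).take (width - 2))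
  let fin := operations.foldl (stepA height) (L0, M0, R0)
  (List.range height).map (fun i => fin.1.getD i 0 :: (fin.2.1.getD i [] ++ [fin.2.2.getD i 0]))

-- ===== PORT B =====
-- B's loop body on the plain grid (Source B): cyclic row shift / clockwise border-ring rotation.
def stepB (h w : Nat) (g : List (List Int)) (op : String) : List (List Int) :=
  if op = "ShiftRow" then
    g.getLastD [] :: g.dropLast
  else
    (List.range h).map (fun i =>
      let row := g.getD i []
      if i = 0 then (g.getD 1 []).getD 0 0 :: row.take (w - 1)
      else if i = h - 1 then row.drop 1 ++ [(g.getD (h - 2) []).getD (w - 1) 0]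
      else (g.getD (i + 1) []).getD 0 0 ::
        (((row.drop 1).take (w - 2)) ++ [(g.getD (i - 1) []).getD (w - 1) 0]))

def solution_alt (rc : List (List Int)) (operations : List String) : List (List Int) :=
  operations.foldl (stepB rc.length (rc.headD []).length) rc

-- ===== PRECONDITION & SPEC =====
-- Pre_ restricts to the task's natural domain (a rectangular matrix with at least 2 rows and
-- 2 columns, as the problem statement guarantees): outside it A returns accidental shapes
-- (it truncates rows longer than row 0; on width 1 it returns rows of width 2; on height 1
-- the Rotate step scrambles the single row) or raises.
def Pre_solution (rc : List (List Int)) (operations : List String) : Prop :=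
  2 ≤ rc.length ∧ 2 ≤ (rc.headD []).length ∧
    ∀ row ∈ rc, row.length = (rc.headD []).length
instance (rc : List (List Int)) (operations : List String) : Decidable (Pre_solution rc operations) := by unfold Pre_solution; infer_instance

def pvWitness_solution : List (List Int) × List String :=
  ([[1, 2], [3, 4]], ["Rotate", "ShiftRow"])

def Spec_solution (rc : List (List Int)) (operations : List String) (out : List (List Int)) : Prop := out = solution_alt rc operations
instance (rc : List (List Int)) (operations : List String) (out : List (List Int)) : Decidable (Spec_solution rc operations out) := by unfold Spec_solution; infer_instance

-- ===== CLAIM (what is proved, stated in full; the proofs are below) =====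
def Claim_equal_solution : Prop := ∀ (rc : List (List Int)) (operations : List String), Dom_solution rc operations → Pre_solution rc operations → Spec_solution rc operations (solution rc operations)

-- ===== LEMMAS AND PROOFS =====

-- the simulation invariant: row i of B's grid is A's left[i] :: rows[i] ++ [right[i]]
def SimInv (h w : Nat) (L : List Int) (M : List (List Int)) (R : List Int)
    (g : List (List Int)) : Prop :=
  L.length = h ∧ M.length = h ∧ R.length = h ∧ g.length = h ∧
    ∀ i, i < h → (M.getD i []).length = w - 2 ∧
      g.getD i [] = L.getD i 0 :: (M.getD i [] ++ [R.getD i 0])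

lemma headD_cons_drop {α : Type} (l : List α) (d : α) (h : l ≠ []) :
    l.headD d :: l.drop 1 = l := by
  cases l with
  | nil => exact absurd rfl h
  | cons a t => simp

lemma getLastD_eq_getElem {α : Type} (l : List α) (d : α) (h : 0 < l.length) :
    l.getLastD d = l[l.length - 1] := by
  cases l with
  | nil => simp at h
  | cons a t =>
    rw [List.getLastD_eq_getLast?, List.getLast?_eq_getElem?, List.getElem?_eq_getElem (by simp)]
    rfl


lemma getD_lt {α : Type} (l : List α) (d : α) (i : Nat) (h : i < l.length) :
    l.getD i d = l[i] := List.getD_eq_getElem l d h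

lemma getD_set_ne {α : Type} (l : List α) (n : Nat) (a : α) (i : Nat) (d : α)
    (h : n ≠ i) : (l.set n a).getD i d = l.getD i d := by
  rw [List.getD_eq_getElem?_getD, List.getD_eq_getElem?_getD, List.getElem?_set_ne h]

lemma getD_set_self {α : Type} (l : List α) (n : Nat) (a : α) (d : α)
    (h : n < l.length) : (l.set n a).getD n d = a := by
  rw [List.getD_eq_getElem?_getD, List.getElem?_set_self (by omega)]
  rfl

lemma getD_append_left {α : Type} (l1 l2 : List α) (i : Nat) (d : α)
    (h : i < l1.length) : (l1 ++ l2).getD i d = l1.getD i d := by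
  rw [List.getD_eq_getElem?_getD, List.getD_eq_getElem?_getD, List.getElem?_append_left h]

lemma getD_append_length {α : Type} (l : List α) (x d : α) :
    (l ++ [x]).getD l.length d = x := by
  simp [List.getD_eq_getElem?_getD]

lemma getD_dropLast {α : Type} (l : List α) (i : Nat) (d : α) (h : i + 1 < l.length) :
    l.dropLast.getD i d = l.getD i d := by
  have h1 : i < l.dropLast.length := by simp; omega
  rw [List.getD_eq_getElem _ _ h1, List.getD_eq_getElem _ _ (by omega : i < l.length),
    List.getElem_dropLast]

lemma getD_drop_one {α : Type} (l : List α) (i : Nat) (d : α) (h : 1 + i < l.length) :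
    (l.drop 1).getD i d = l.getD (1 + i) d := by
  have h1 : i < (l.drop 1).length := by simp; omega
  rw [List.getD_eq_getElem _ _ h1, List.getD_eq_getElem _ _ h, List.getElem_drop]

lemma headD_eq_getD {α : Type} (l : List α) (d : α) : l.headD d = l.getD 0 d := by
  cases l <;> simp

lemma dropLast_append_getLastD {α : Type} (l : List α) (d : α) (h : l ≠ []) :
    l.dropLast ++ [l.getLastD d] = l := by
  rw [List.getLastD_eq_getLast?, List.getLast?_eq_some_getLast h]
  exact List.dropLast_append_getLast h

lemma getD_map_range {α : Type} (f : Nat → α) (h i : Nat) (d : α) (hi : i < h) :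
    ((List.range h).map f).getD i d = f i := by
  rw [List.getD_eq_getElem _ _ (by simp [hi])]
  simp

lemma getLastD_eq_getD {α : Type} (l : List α) (d : α) (h : 0 < l.length) :
    l.getLastD d = l.getD (l.length - 1) d := by
  rw [getLastD_eq_getElem _ _ h, getD_lt _ _ _ (by omega)]

lemma row_decomp (row : List Int) (w : Nat) (hw : 2 ≤ w) (hlen : row.length = w) :
    row = row.headD 0 :: ((row.drop 1).take (w - 2) ++ [row.getD (w - 1) 0]) := by
  cases row with
  | nil => simp at hlen; omega
  | cons a t =>
    have ht : t.length = w - 1 := by simp at hlen; omega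
    have htne : t ≠ [] := by intro h; rw [h] at ht; simp at ht; omega
    simp only [List.headD_cons, List.drop_succ_cons, List.drop_zero]
    have h1 : t.take (w - 2) = t.dropLast := by
      have hww : w - 1 - 1 = w - 2 := by omega
      rw [List.dropLast_eq_take, ht, hww]
    have h2 : (a :: t).getD (w - 1) 0 = t.getLastD 0 := by
      have : w - 1 = (w - 2) + 1 := by omega
      rw [this, List.getD_cons_succ, getD_lt _ _ _ (by omega),
        getLastD_eq_getElem _ _ (by omega)]
      congr 1
      omega
    rw [h1, h2, dropLast_append_getLastD _ _ htne]

lemma getD_snoc_of_eq {α : Type} (l : List α) (x d : α) (n : Nat) (hn : n = l.length) :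
    (l ++ [x]).getD n d = x := by
  subst hn
  exact getD_append_length l x d

lemma getD_cons_of_eq {α : Type} (a : α) (l : List α) (n m : Nat) (d : α)
    (hn : n = m + 1) : (a :: l).getD n d = l.getD m d := by
  subst hn
  exact List.getD_cons_succ

lemma step_preserve (h w : Nat) (hh : 2 ≤ h) (hw : 2 ≤ w)
    (L : List Int) (M : List (List Int)) (R : List Int) (g : List (List Int)) (op : String)
    (inv : SimInv h w L M R g) :
    SimInv h w (stepA h (L, M, R) op).1 (stepA h (L, M, R) op).2.1
      (stepA h (L, M, R) op).2.2 (stepB h w g op) := by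
  obtain ⟨hL, hM, hR, hg, hpt⟩ := inv
  by_cases hop : op = "ShiftRow"
  · subst hop
    simp only [stepA, stepB, if_pos]
    refine ⟨by simp [hL]; omega, by simp [hM]; omega, by simp [hR]; omega, by simp [hg]; omega, ?_⟩
    intro i hi
    cases i with
    | zero =>
      rw [List.getD_cons_zero, List.getD_cons_zero, List.getD_cons_zero, List.getD_cons_zero,
        getLastD_eq_getD _ _ (by omega), getLastD_eq_getD _ _ (by omega),
        getLastD_eq_getD _ _ (by omega), getLastD_eq_getD _ _ (by omega), hL, hM, hR, hg]
      exact hpt (h - 1) (by omega)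
    | succ j =>
      rw [List.getD_cons_succ, List.getD_cons_succ, List.getD_cons_succ, List.getD_cons_succ,
        getD_dropLast _ _ _ (by omega), getD_dropLast _ _ _ (by omega),
        getD_dropLast _ _ _ (by omega), getD_dropLast _ _ _ (by omega)]
      exact hpt j (by omega)
  · simp only [stepA, stepB, if_neg hop]
    refine ⟨?_, ?_, ?_, ?_, ?_⟩
    · simp [hL]; omega
    · simp [hM]
    · simp [hR]
    · simp
    · intro i hi
      have hRne : R ≠ [] := by intro hE; rw [hE] at hR; simp at hR; omega
      have eDL : ((L.headD 0 :: M.headD []).getLastD 0 :: R).dropLast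
          = (L.headD 0 :: M.headD []).getLastD 0 :: R.dropLast := by
        cases R with
        | nil => exact absurd rfl hRne
        | cons b t => simp
      rw [eDL, getD_map_range _ _ _ _ hi]
      have eM1 : (M.set 0 (L.headD 0 :: M.headD []).dropLast).getD (h - 1) []
          = M.getD (h - 1) [] := getD_set_ne _ _ _ _ _ (by omega)
      rw [eM1]
      have eRlast : ((L.headD 0 :: M.headD []).getLastD 0 :: R).getLastD 0
          = R.getD (h - 1) 0 := by
        rw [List.getLastD_cons, getLastD_eq_getD _ _ (by omega), hR,
          getD_lt _ _ _ (by omega), getD_lt _ _ _ (by omega)]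
      rw [eRlast]
      by_cases hi0 : i = 0
      · subst hi0
        simp only [ite_true]
        have p0 := hpt 0 (by omega)
        have p1 := hpt 1 (by omega)
        rw [p1.2, List.getD_cons_zero, p0.2]
        have etake : List.take (w - 1) (L.getD 0 0 :: (M.getD 0 [] ++ [R.getD 0 0]))
            = L.getD 0 0 :: M.getD 0 [] := by
          rw [show L.getD 0 0 :: (M.getD 0 [] ++ [R.getD 0 0])
              = (L.getD 0 0 :: M.getD 0 []) ++ [R.getD 0 0] by simp,
            List.take_left' (by rw [List.length_cons, p0.1]; omega)]
        rw [etake, getD_append_left _ _ _ _ (by simp [hL]; omega),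
          getD_drop_one _ _ _ (by omega),
          getD_set_ne _ _ _ _ _ (by omega), getD_set_self _ _ _ _ (by omega),
          List.getD_cons_zero]
        constructor
        · simp only [List.length_dropLast, List.length_cons, headD_eq_getD, p0.1]
          omega
        · rw [dropLast_append_getLastD _ _ (by simp)]
          simp [List.head?_eq_getElem?]
      · by_cases hih : i = h - 1
        · subst hih
          simp only [if_neg hi0, ite_true]
          have pl := hpt (h - 1) (by omega)
          have pl2 := hpt (h - 2) (by omega)
          rw [pl.2, pl2.2, List.drop_succ_cons, List.drop_zero]
          have eget : (L.getD (h - 2) 0 :: (M.getD (h - 2) [] ++ [R.getD (h - 2) 0])).getD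
              (w - 1) 0 = R.getD (h - 2) 0 := by
            rw [show L.getD (h - 2) 0 :: (M.getD (h - 2) [] ++ [R.getD (h - 2) 0])
                = (L.getD (h - 2) 0 :: M.getD (h - 2) []) ++ [R.getD (h - 2) 0] by simp,
              show w - 1 = (L.getD (h - 2) 0 :: M.getD (h - 2) []).length by
                rw [List.length_cons, pl2.1]; omega,
              getD_append_length]
          rw [eget,
            getD_snoc_of_eq _ _ _ _ (by simp [hL]),
            getD_set_self _ _ _ _ (by simp [hM]; omega),
            getD_cons_of_eq _ _ _ _ _ (show (h : Nat) - 1 = (h - 2) + 1 by omega),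
            getD_dropLast _ _ _ (by omega)]
          constructor
          · simp only [List.length_drop, List.length_append, List.length_cons,
              List.length_nil, pl.1]
            omega
          · rw [← List.cons_append, headD_cons_drop _ _ (by simp)]
        · obtain ⟨j, rfl⟩ : ∃ j, i = j + 1 := ⟨i - 1, by omega⟩
          simp only [if_neg hi0, if_neg hih, Nat.add_sub_cancel]
          rw [(hpt (j + 1) hi).2, (hpt (j + 1 + 1) (by omega)).2, (hpt j (by omega)).2,
            List.drop_succ_cons, List.drop_zero, List.getD_cons_zero]
          have etake : List.take (w - 2) (M.getD (j + 1) [] ++ [R.getD (j + 1) 0])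
              = M.getD (j + 1) [] :=
            List.take_left' (hpt (j + 1) hi).1
          have eget : (L.getD j 0 :: (M.getD j [] ++ [R.getD j 0])).getD (w - 1) 0
              = R.getD j 0 := by
            rw [show L.getD j 0 :: (M.getD j [] ++ [R.getD j 0])
                = (L.getD j 0 :: M.getD j []) ++ [R.getD j 0] by simp,
              show w - 1 = (L.getD j 0 :: M.getD j []).length by
                rw [List.length_cons, (hpt j (by omega)).1]; omega,
              getD_append_length]
          rw [etake, eget, getD_append_left _ _ _ _ (by simp [hL]; omega),
            getD_drop_one _ _ _ (by omega),
            getD_set_ne _ _ _ _ _ (by omega), getD_set_ne _ _ _ _ _ (by omega),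
            List.getD_cons_succ, getD_dropLast _ _ _ (by omega)]
          constructor
          · exact (hpt (j + 1) hi).1
          · rw [show 1 + (j + 1) = j + 1 + 1 by omega]

lemma fold_preserve (h w : Nat) (hh : 2 ≤ h) (hw : 2 ≤ w)
    (ops : List String) (L : List Int) (M : List (List Int)) (R : List Int)
    (g : List (List Int)) (inv : SimInv h w L M R g) :
    SimInv h w (ops.foldl (stepA h) (L, M, R)).1 (ops.foldl (stepA h) (L, M, R)).2.1
      (ops.foldl (stepA h) (L, M, R)).2.2 (ops.foldl (stepB h w) g) := by
  induction ops generalizing L M R g with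
  | nil => exact inv
  | cons op rest ih =>
    simp only [List.foldl_cons]
    have := step_preserve h w hh hw L M R g op inv
    exact ih _ _ _ _ this

lemma inv_init (rc : List (List Int)) (_hh : 2 ≤ rc.length)
    (hw : 2 ≤ (rc.headD []).length)
    (hrect : ∀ row ∈ rc, row.length = (rc.headD []).length) :
    SimInv rc.length (rc.headD []).length
      (rc.map (fun r => r.headD 0))
      (rc.map (fun r => (r.drop 1).take ((rc.headD []).length - 2)))
      (rc.map (fun r => r.getD ((rc.headD []).length - 1) 0)) rc := by
  refine ⟨by simp, by simp, by simp, rfl, ?_⟩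
  intro i hi
  have hlen : rc[i].length = (rc.headD []).length := hrect _ (List.getElem_mem hi)
  constructor
  · rw [getD_lt _ _ _ (by simp [hi])]
    simp only [List.getElem_map]
    simp [hlen]
    omega
  · rw [getD_lt _ _ _ hi, getD_lt _ _ _ (by simp [hi]), getD_lt _ _ _ (by simp [hi]),
      getD_lt _ _ _ (by simp [hi])]
    simp only [List.getElem_map]
    exact row_decomp rc[i] _ hw hlen

lemma answer_eq (h w : Nat) (L : List Int) (M : List (List Int)) (R : List Int)
    (g : List (List Int)) (inv : SimInv h w L M R g) :
    (List.range h).map (fun i => L.getD i 0 :: (M.getD i [] ++ [R.getD i 0])) = g := by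
  obtain ⟨hL, hM, hR, hg, hpt⟩ := inv
  apply List.ext_getElem (by simp [hg])
  intro i hi1 hi2
  have hi : i < h := by simpa using hi1
  have h2 := (hpt i hi).2
  rw [List.getD_eq_getElem _ _ (by omega : i < g.length)] at h2
  simp only [List.getElem_map, List.getElem_range]
  exact h2.symm

-- ===== VERDICT (by name: the statement is the Claim_ definition above) =====
theorem solution_spec : Claim_equal_solution := by
  intro rc operations _hdom hpre
  obtain ⟨hh, hw, hrect⟩ := hpre
  exact answer_eq rc.length (rc.headD []).length _ _ _ _
    (fold_preserve rc.length (rc.headD []).length hh hw operations _ _ _ rc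
      (inv_init rc hh hw hrect))
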